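-- pv_equiv track=rewrite | github.com/suqingdong/go_trace | main.py | trace_ancestor_paths
-- ===== SOURCE A (Python) =====
-- def trace_ancestor_paths(term_id, all_terms):
--     """
--     Trace all ancestor paths for a given term.
--
--     :param term_id: The term ID whose ancestor paths are to be found.
--     :param all_terms: A dictionary of all terms with their parents.
--     :return: A list of lists, where each inner list is a path from the term to one of its farthest ancestors.
--     """
--     paths = []
--     def recurse(current_term, current_path):
--         if current_term not in all_terms or not all_terms[current_term]['parents']:
--             paths.append(current_path)
--             return
--         for parent_id in all_terms[current_term]['parents']:
--             recurse(parent_id, current_path + [parent_id])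
--
--     recurse(term_id, [term_id])
--     return paths
-- ===== SOURCE B (Python) =====
-- def trace_ancestor_paths(term_id, all_terms):
--     """Pure value-returning recursion: each call returns the list of ancestor
--     paths starting at its own term, built back-to-front by prepending."""
--     def paths_from(t):
--         if t in all_terms and all_terms[t]['parents']:
--             return [[t] + tail
--                     for parent in all_terms[t]['parents']
--                     for tail in paths_from(parent)]
--         return [[t]]
--     return paths_from(term_id)
-- ===== Notes on version B (the rewrite author's own statement) =====
-- stated objective: simpler
-- what changed: A's side-effecting DFS that threads a mutable results list and a forward-growing current_path accumulator is replaced by a pure recursion that returns each term's ancestor-path list directly and builds every path back-to-front by prepending the current term.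
import Mathlib
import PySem

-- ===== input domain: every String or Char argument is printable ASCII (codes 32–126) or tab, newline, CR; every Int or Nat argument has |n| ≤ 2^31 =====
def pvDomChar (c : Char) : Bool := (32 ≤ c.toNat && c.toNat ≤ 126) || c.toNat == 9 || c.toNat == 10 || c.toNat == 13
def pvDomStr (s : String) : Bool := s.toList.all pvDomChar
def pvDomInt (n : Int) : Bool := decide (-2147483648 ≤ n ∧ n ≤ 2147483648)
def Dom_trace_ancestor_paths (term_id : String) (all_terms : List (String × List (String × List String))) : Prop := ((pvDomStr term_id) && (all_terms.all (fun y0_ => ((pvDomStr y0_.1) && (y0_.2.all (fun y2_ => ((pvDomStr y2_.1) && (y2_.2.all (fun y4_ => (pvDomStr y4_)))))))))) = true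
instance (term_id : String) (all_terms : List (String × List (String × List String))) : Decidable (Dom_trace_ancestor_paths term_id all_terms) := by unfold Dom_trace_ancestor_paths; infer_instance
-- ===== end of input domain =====

-- B replaces A's side-effecting DFS (mutable results list + forward-growing path accumulator)
-- by a pure recursion returning each term's path list, built back-to-front by prepending (objective: simpler).
-- Both Lean ports carry a fuel guard (all_terms.length + 1) that only makes the shared recursion total;
-- under Pre_ (no reachable cycle) the Python recursion depth never exceeds it.

-- first-match association-list lookup (Python 'in' / '[]' on the dict)
def pvGet? {α : Type} (m : List (String × α)) (k : String) : Option α :=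
  (m.find? (fun p => p.1 == k)).map (·.2)

-- ===== PORT A =====
-- A's nested 'recurse' with the nonlocal 'paths' list threaded as 'acc';
-- the 'for parent_id in …' loop is the mutually recursive 'pvLoopA'.
mutual
def pvRecurseA (m : List (String × List (String × List String))) :
    Nat → String → List String → List (List String) → List (List String)
  | 0, _, _, acc => acc          -- fuel guard; never reached under Pre_
  | f + 1, t, p, acc =>
    match pvGet? m t with
    | none => acc ++ [p]
    | some d =>
      let ps := (pvGet? d "parents").getD []   -- KeyError on missing 'parents' is excluded by Pre_
      if ps.isEmpty then acc ++ [p]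
      else pvLoopA m f ps p acc
  termination_by f _ _ _ => (f, 0)
def pvLoopA (m : List (String × List (String × List String))) :
    Nat → List String → List String → List (List String) → List (List String)
  | _, [], _, acc => acc
  | f, q :: rest, p, acc => pvLoopA m f rest p (pvRecurseA m f q (p ++ [q]) acc)
  termination_by f l _ _ => (f, l.length + 1)
end

def trace_ancestor_paths (term_id : String) (all_terms : List (String × List (String × List String))) : List (List String) :=
  pvRecurseA all_terms (all_terms.length + 1) term_id [term_id] []

-- ===== PORT B =====
-- Source B's 'paths_from': returns the path list for one term; the double comprehension is flatMap/map.
def pvPathsFrom (m : List (String × List (String × List String))) :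
    Nat → String → List (List String)
  | 0, _ => []                   -- fuel guard; never reached under Pre_
  | f + 1, t =>
    match pvGet? m t with
    | some d =>
      let ps := (pvGet? d "parents").getD []
      if ps.isEmpty then [[t]]
      else ps.flatMap (fun parent => (pvPathsFrom m f parent).map (fun tail => t :: tail))
    | none => [[t]]

def trace_ancestor_paths_alt (term_id : String) (all_terms : List (String × List (String × List String))) : List (List String) :=
  pvPathsFrom all_terms (all_terms.length + 1) term_id

-- ===== PRECONDITION & SPEC =====
-- graph helpers for Pre_: the parent relation and its bounded closure (a shape condition on the input graph)
def pvSuccs (m : List (String × List (String × List String))) (t : String) : List String :=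
  match pvGet? m t with
  | some d => (pvGet? d "parents").getD []
  | none => []

def pvGrow (m : List (String × List (String × List String))) : Nat → List String → List String
  | 0, s => s
  | k + 1, s => pvGrow m k (s ++ (s.flatMap (pvSuccs m)).filter (fun x => ¬ s.contains x))

-- Pre_ excludes exactly the inputs where the Python A raises: a term reachable from term_id whose
-- dict entry lacks the 'parents' key (KeyError), or a reachable cycle in the parent relation
-- (unbounded recursion, RecursionError).
def Pre_trace_ancestor_paths (term_id : String) (all_terms : List (String × List (String × List String))) : Prop :=
  ∀ u ∈ pvGrow all_terms (all_terms.length + 2) [term_id],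
    (∀ d, pvGet? all_terms u = some d → pvGet? d "parents" ≠ none) ∧
    ¬ (pvGrow all_terms (all_terms.length + 2) (pvSuccs all_terms u)).contains u
instance (term_id : String) (all_terms : List (String × List (String × List String))) : Decidable (Pre_trace_ancestor_paths term_id all_terms) := by unfold Pre_trace_ancestor_paths; infer_instance

def pvWitness_trace_ancestor_paths : String × (List (String × List (String × List String))) :=
  ("a", [("a", [("parents", ["b", "c"])]), ("b", [("parents", [])])])

def Spec_trace_ancestor_paths (term_id : String) (all_terms : List (String × List (String × List String))) (out : List (List String)) : Prop := out = trace_ancestor_paths_alt term_id all_terms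
instance (term_id : String) (all_terms : List (String × List (String × List String))) (out : List (List String)) : Decidable (Spec_trace_ancestor_paths term_id all_terms out) := by unfold Spec_trace_ancestor_paths; infer_instance

-- ===== CLAIM (what is proved, stated in full; the proofs are below) =====
def Claim_equal_trace_ancestor_paths : Prop := ∀ (term_id : String) (all_terms : List (String × List (String × List String))), Dom_trace_ancestor_paths term_id all_terms → Pre_trace_ancestor_paths term_id all_terms → Spec_trace_ancestor_paths term_id all_terms (trace_ancestor_paths term_id all_terms)

-- ===== LEMMAS AND PROOFS =====

-- every path produced by pvPathsFrom starts with its term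
lemma pvPathsFrom_head (m : List (String × List (String × List String))) (f : Nat) (t : String)
    (l : List String) (hl : l ∈ pvPathsFrom m f t) : ∃ r, l = t :: r := by
  cases f with
  | zero => simp [pvPathsFrom] at hl
  | succ f =>
    unfold pvPathsFrom at hl
    cases h : pvGet? m t with
    | none => rw [h] at hl; simp at hl; exact ⟨[], by simp [hl]⟩
    | some d =>
      rw [h] at hl
      simp only at hl
      split at hl
      · simp at hl; exact ⟨[], by simp [hl]⟩
      · simp only [List.mem_flatMap, List.mem_map] at hl
        obtain ⟨q, _, tail, _, rfl⟩ := hl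
        exact ⟨tail, rfl⟩

-- the accumulator invariant linking A's recursion to B's pure recursion (same fuel)
lemma pvRecurseA_eq (m : List (String × List (String × List String))) (f : Nat) :
    ∀ (t : String) (p : List String) (acc : List (List String)),
      pvRecurseA m f t p acc = acc ++ (pvPathsFrom m f t).map (fun l => p ++ l.drop 1) := by
  induction f with
  | zero => intro t p acc; simp [pvRecurseA, pvPathsFrom]
  | succ f ih =>
    have loop : ∀ (ps : List String) (p : List String) (acc : List (List String)),
        pvLoopA m f ps p acc
          = acc ++ ps.flatMap (fun q => (pvPathsFrom m f q).map (fun l => (p ++ [q]) ++ l.drop 1)) := by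
      intro ps
      induction ps with
      | nil => intro p acc; simp [pvLoopA]
      | cons q rest ihr =>
        intro p acc
        rw [pvLoopA, ihr, ih]
        simp [List.append_assoc]
    intro t p acc
    rw [pvRecurseA, pvPathsFrom]
    cases h : pvGet? m t with
    | none => simp
    | some d =>
      simp only
      split
      · simp
      · rw [loop]
        congr 1
        rw [List.map_flatMap]
        apply List.flatMap_congr
        intro q _
        rw [List.map_map]
        apply List.map_congr_left
        intro l hl
        obtain ⟨r, rfl⟩ := pvPathsFrom_head m f q l hl
        simp

-- ===== VERDICT (by name: the statement is the Claim_ definition above) =====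
theorem trace_ancestor_paths_spec : Claim_equal_trace_ancestor_paths := by
  intro term_id all_terms _ _
  unfold Spec_trace_ancestor_paths trace_ancestor_paths trace_ancestor_paths_alt
  rw [pvRecurseA_eq]
  simp only [List.nil_append]
  conv_rhs => rw [← List.map_id (pvPathsFrom all_terms (all_terms.length + 1) term_id)]
  apply List.map_congr_left
  intro l hl
  obtain ⟨r, rfl⟩ := pvPathsFrom_head _ _ _ _ hl
  simp
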